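-- pv_equiv track=rewrite | github.com/kao910019/Chatbot | nlp.py | de_subtokenize
-- ===== SOURCE A (Python) =====
-- def de_subtokenize(subtokens):
--     tokens = []
--     for index, token in enumerate(subtokens):
--         if token.startswith("##"):
--             if tokens:
--                 tokens[-1] = "{}{}".format(tokens[-1], token[2:])
--         else:
--             tokens.append(token)
--     return tokens
-- ===== SOURCE B (Python) =====
-- def de_subtokenize(subtokens):
--     words = []
--     cur = None  # list of pieces of the currently open word, or None
--     for token in subtokens:
--         if token.startswith("##"):
--             if cur is not None:
--                 cur.append(token[2:])
--             # orphan '##' piece with no open word: dropped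
--         else:
--             if cur is not None:
--                 words.append("".join(cur))
--             cur = [token]
--     if cur is not None:
--         words.append("".join(cur))
--     return words
-- ===== Notes on version B (the rewrite author's own statement) =====
-- stated objective: alternative
-- what changed: Replaces A's repeated rewrite of tokens[-1] by a single pass that buffers the pieces of the currently open word in an accumulator and joins them once when the word is flushed.
import Mathlib
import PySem

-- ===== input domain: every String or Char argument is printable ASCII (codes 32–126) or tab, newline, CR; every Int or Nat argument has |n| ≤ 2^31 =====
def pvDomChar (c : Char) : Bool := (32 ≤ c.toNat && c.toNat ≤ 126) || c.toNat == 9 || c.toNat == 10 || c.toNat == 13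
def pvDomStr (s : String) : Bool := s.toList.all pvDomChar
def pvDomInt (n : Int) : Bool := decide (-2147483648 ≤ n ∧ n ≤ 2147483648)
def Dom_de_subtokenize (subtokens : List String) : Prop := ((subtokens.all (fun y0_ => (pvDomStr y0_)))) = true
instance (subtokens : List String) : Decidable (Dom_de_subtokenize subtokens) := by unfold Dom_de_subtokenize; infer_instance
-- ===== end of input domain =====

-- B merges WordPiece '##' subtokens by buffering the open word's pieces and joining once per word,
-- instead of A's rewriting of tokens[-1] on every '##' piece (alternative decomposition; return value only).

-- ===== PORT A =====
-- for token in subtokens: if token.startswith("##"): if tokens: tokens[-1] = tokens[-1] + token[2:]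
--                         else: tokens.append(token)
def de_subtokenize (subtokens : List String) : List String :=
  subtokens.foldl (fun tokens token =>
    if PySem.Str.startswith token "##" then
      match tokens.getLast? with
      | some last =>
          tokens.dropLast ++
            [String.ofList (last.toList ++ (PySem.Str.slice token (some 2) none).toList)]
      | none => tokens
    else tokens ++ [token]) []

-- ===== PORT B =====
-- structural recursion over the subtokens, state = (open-word pieces or none, finished words)
def deSubGo (rest : List String) (cur : Option (List String)) (words : List String) : List String :=
  match rest with
  | [] =>
      match cur with
      | none => words
      | some ps => words ++ [PySem.Str.join "" ps]
  | t :: ts =>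
      if PySem.Str.startswith t "##" then
        match cur with
        | some ps => deSubGo ts (some (ps ++ [PySem.Str.slice t (some 2) none])) words
        | none => deSubGo ts none words
      else
        match cur with
        | some ps => deSubGo ts (some [t]) (words ++ [PySem.Str.join "" ps])
        | none => deSubGo ts (some [t]) words

def de_subtokenize_alt (subtokens : List String) : List String :=
  deSubGo subtokens none []

-- ===== PRECONDITION & SPEC =====
def Spec_de_subtokenize (subtokens : List String) (out : List String) : Prop := out = de_subtokenize_alt subtokens
instance (subtokens : List String) (out : List String) : Decidable (Spec_de_subtokenize subtokens out) := by unfold Spec_de_subtokenize; infer_instance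

-- ===== CLAIM (what is proved, stated in full; the proofs are below) =====
def Claim_equal_de_subtokenize : Prop := ∀ (subtokens : List String), Dom_de_subtokenize subtokens → Spec_de_subtokenize subtokens (de_subtokenize subtokens)

-- ===== LEMMAS AND PROOFS =====

-- "".join over a snoc of pieces appends the last piece's characters
theorem charsJoinNil_snoc (ps : List (List Char)) (p : List Char) :
    PySem.Chars.join [] (ps ++ [p]) = PySem.Chars.join [] ps ++ p := by
  induction ps with
  | nil => simp [PySem.Chars.join_nil, PySem.Chars.join_singleton]
  | cons x xs ih =>
    cases xs with
    | nil => simp [PySem.Chars.join_singleton, PySem.Chars.join_cons_cons] at *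
    | cons y ys => simp [PySem.Chars.join_cons_cons] at *; simp [ih]

theorem joinNil_snoc (ps : List String) (p : String) :
    PySem.Str.join "" (ps ++ [p]) = String.ofList ((PySem.Str.join "" ps).toList ++ p.toList) := by
  have h : (PySem.Str.join "" (ps ++ [p])).toList
      = (PySem.Str.join "" ps).toList ++ p.toList := by
    simp [charsJoinNil_snoc]
  conv_lhs => rw [← String.ofList_toList (s := PySem.Str.join "" (ps ++ [p]))]
  rw [h]

-- the fold state of A equals (finished words) ++ (joined open word), provided cur = none forces words = []
theorem go_eq (rest : List String) : ∀ (cur : Option (List String)) (words : List String),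
    (cur = none → words = []) →
    rest.foldl (fun tokens token =>
      if PySem.Str.startswith token "##" then
        match tokens.getLast? with
        | some last =>
            tokens.dropLast ++
              [String.ofList (last.toList ++ (PySem.Str.slice token (some 2) none).toList)]
        | none => tokens
      else tokens ++ [token])
      (words ++ (match cur with | none => [] | some ps => [PySem.Str.join "" ps]))
      = deSubGo rest cur words := by
  induction rest with
  | nil =>
    intro cur words _
    cases cur <;> simp [deSubGo]
  | cons t ts ih =>
    intro cur words hcw
    simp only [List.foldl_cons, deSubGo]
    by_cases hs : PySem.Str.startswith t "##"
    · simp only [hs, if_pos]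
      cases cur with
      | none =>
        have hw : words = [] := hcw rfl
        subst hw
        simpa using ih none [] (fun _ => rfl)
      | some ps =>
        rw [List.getLast?_concat, List.dropLast_concat]
        have := ih (some (ps ++ [PySem.Str.slice t (some 2) none])) words (by simp)
        simpa [joinNil_snoc] using this
    · simp only [hs]
      cases cur with
      | none =>
        have hw : words = [] := hcw rfl
        subst hw
        have := ih (some [t]) [] (by simp)
        simpa [PySem.Str.join] using this
      | some ps =>
        have := ih (some [t]) (words ++ [PySem.Str.join "" ps]) (by simp)
        simpa [PySem.Str.join] using this

-- ===== VERDICT (by name: the statement is the Claim_ definition above) =====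
theorem de_subtokenize_spec : Claim_equal_de_subtokenize := by
  intro subtokens _
  show de_subtokenize subtokens = de_subtokenize_alt subtokens
  have h := go_eq subtokens none [] (fun _ => rfl)
  simpa [de_subtokenize, de_subtokenize_alt] using h
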